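-- pv_equiv track=rewrite | github.com/nidinnover-hash/Team-Empire-BOS- | scripts/migrate_api_key_scopes.py | _phase2_target
-- ===== SOURCE A (Python) =====
-- def _normalize_list(raw: str) -> list[str]:
--     return [part.strip().lower() for part in raw.split(",") if part.strip()]
--
-- def _phase2_target(scopes: str, resources: tuple[str, ...]) -> str | None:
--     parts = _normalize_list(scopes)
--     if not parts:
--         return None
--     unique = tuple(dict.fromkeys(parts))
--
--     def all_read() -> str:
--         return ",".join(f"{r}:read" for r in resources)
--
--     def all_write() -> str:
--         return ",".join(f"{r}:write" for r in resources)
--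
--     def all_full() -> str:
--         return ",".join(f"{r}:*" for r in resources)
--
--     if unique in {("read",), ("api:read",)}:
--         return all_read()
--     if unique in {("write",), ("api:write",)}:
--         return all_write()
--     if set(unique) == {"read", "write"} or unique == ("api:*",):
--         return all_full()
--     return None
-- ===== SOURCE B (Python) =====
-- def _normalize_list(raw: str) -> list[str]:
--     return [part.strip().lower() for part in raw.split(",") if part.strip()]
--
-- # per-token classification: capability bits (read=1, write=2) and whether the token is api:-style
-- _TOKEN = {"read": (1, 0), "write": (2, 0),
--           "api:read": (1, 1), "api:write": (2, 1), "api:*": (3, 1)}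
--
-- def _phase2_target(scopes: str, resources: tuple[str, ...]) -> str | None:
--     mask = api = n = 0
--     for tok in dict.fromkeys(_normalize_list(scopes)):
--         info = _TOKEN.get(tok)
--         if info is None:
--             return None
--         mask |= info[0]
--         api += info[1]
--         n += 1
--     if n == 0:
--         return None
--     # plain tokens may combine freely; an api:-style token must stand alone
--     if api == 0 or api == n == 1:
--         suffix = ("read", "write", "*")[mask - 1]
--         return ",".join(f"{r}:{suffix}" for r in resources)
--     return None
-- ===== Notes on version B (the rewrite author's own statement) =====
-- stated objective: alternative
-- what changed: Instead of comparing the whole deduplicated scope tuple against literal combinations, B classifies each token independently into capability bits (read=1, write=2) plus an api-style counter, folds them with bitwise OR in one pass, accepts via the closed condition 'all plain, or a single api token', and derives the suffix by indexing with the accumulated mask.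
import Mathlib
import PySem

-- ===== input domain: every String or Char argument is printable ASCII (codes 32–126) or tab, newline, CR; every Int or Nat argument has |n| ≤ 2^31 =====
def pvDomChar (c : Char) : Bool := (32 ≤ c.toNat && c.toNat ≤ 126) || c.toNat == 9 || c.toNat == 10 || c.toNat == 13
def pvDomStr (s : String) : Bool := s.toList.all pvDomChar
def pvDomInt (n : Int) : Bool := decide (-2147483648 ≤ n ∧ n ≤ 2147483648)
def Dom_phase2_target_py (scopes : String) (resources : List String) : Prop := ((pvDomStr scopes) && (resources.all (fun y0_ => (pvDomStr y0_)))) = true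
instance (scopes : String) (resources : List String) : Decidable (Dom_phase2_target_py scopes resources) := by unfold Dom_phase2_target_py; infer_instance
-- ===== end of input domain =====

-- B replaces A's comparison of the whole deduplicated scope tuple against literal combinations by a
-- one-pass per-token classification into capability bits OR-ed together plus an api-style counter,
-- a closed acceptance condition, and a suffix indexed by the accumulated mask (objective: alternative).

-- ===== PORT A =====
-- shared helper: both Pythons define the identical _normalize_list
def pvNormalizeList (raw : String) : List String :=
  (((PySem.Str.split? raw ",").getD []).filter (fun p => PySem.Str.strip p != "")).map
    (fun p => PySem.Str.lower (PySem.Str.strip p))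

def phase2_target_py (scopes : String) (resources : List String) : Option String :=
  let parts := pvNormalizeList scopes
  if parts = [] then none
  else
    let unique := PySem.List.dedup parts
    if unique = ["read"] ∨ unique = ["api:read"] then
      some (PySem.Str.join "," (resources.map (fun r => r ++ ":read")))
    else if unique = ["write"] ∨ unique = ["api:write"] then
      some (PySem.Str.join "," (resources.map (fun r => r ++ ":write")))
    else if PySem.Set.equal (PySem.Set.ofList unique) (PySem.Set.ofList ["read", "write"]) = true
            ∨ unique = ["api:*"] then
      some (PySem.Str.join "," (resources.map (fun r => r ++ ":*")))
    else none

-- ===== PORT B =====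
-- the module-level _TOKEN dict: token -> (capability bits, api-style flag); _TOKEN.get(tok)
def pvTokenInfo (t : String) : Option (Nat × Nat) :=
  PySem.Dict.get? (PySem.Dict.ofList
    [("read", (1, 0)), ("write", (2, 0)),
     ("api:read", (1, 1)), ("api:write", (2, 1)), ("api:*", (3, 1))]) t

-- the for-loop over dict.fromkeys(...): accumulates (mask, api, n); none = the early `return None`
def pvScan : List String → Nat → Nat → Nat → Option (Nat × Nat × Nat)
  | [], m, a, n => some (m, a, n)
  | t :: ts, m, a, n =>
    match pvTokenInfo t with
    | none => none
    | some info => pvScan ts (m ||| info.1) (a + info.2) (n + 1)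

def phase2_target_py_alt (scopes : String) (resources : List String) : Option String :=
  match pvScan (PySem.List.dedup (pvNormalizeList scopes)) 0 0 0 with
  | none => none
  | some (m, a, n) =>
    if n = 0 then none
    else if a = 0 ∨ (a = n ∧ n = 1) then
      -- ("read","write","*")[mask-1]; the accumulated mask is always 1, 2 or 3 here
      some (PySem.Str.join ","
        (resources.map (fun r => r ++ ":" ++ PySem.List.pyGetD ["read", "write", "*"] ((m : Int) - 1) "")))
    else none

-- ===== PRECONDITION & SPEC =====
def Spec_phase2_target_py (scopes : String) (resources : List String) (out : Option String) : Prop := out = phase2_target_py_alt scopes resources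
instance (scopes : String) (resources : List String) (out : Option String) : Decidable (Spec_phase2_target_py scopes resources out) := by unfold Spec_phase2_target_py; infer_instance

-- ===== CLAIM (what is proved, stated in full; the proofs are below) =====
def Claim_equal_phase2_target_py : Prop := ∀ (scopes : String) (resources : List String), Dom_phase2_target_py scopes resources → Spec_phase2_target_py scopes resources (phase2_target_py scopes resources)

-- ===== LEMMAS AND PROOFS =====

-- per-token spec of the _TOKEN lookup
def pvBits (t : String) : Nat :=
  if t = "write" ∨ t = "api:write" then 2 else if t = "api:*" then 3 else 1
def pvApi (t : String) : Nat :=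
  if t = "api:read" ∨ t = "api:write" ∨ t = "api:*" then 1 else 0
def pvKeys : List String := ["read", "write", "api:read", "api:write", "api:*"]

theorem pv_tokInfo_of_mem {t : String} (h : t ∈ pvKeys) :
    pvTokenInfo t = some (pvBits t, pvApi t) := by
  simp only [pvKeys, List.mem_cons, List.not_mem_nil, or_false] at h
  rcases h with h | h | h | h | h <;> subst h <;> decide

theorem pv_tokInfo_of_not_mem {t : String} (h : t ∉ pvKeys) : pvTokenInfo t = none := by
  simp only [pvKeys, List.mem_cons, List.not_mem_nil, or_false, not_or] at h
  obtain ⟨h1, h2, h3, h4, h5⟩ := h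
  show PySem.Dict.get? (PySem.Dict.mk
    [("read", (1, 0)), ("write", (2, 0)),
     ("api:read", (1, 1)), ("api:write", (2, 1)), ("api:*", (3, 1))]) t = none
  rw [PySem.Dict.get?_mk_cons, PySem.Dict.get?_mk_cons, PySem.Dict.get?_mk_cons,
    PySem.Dict.get?_mk_cons, PySem.Dict.get?_mk_cons]
  simp [PySem.Dict.get?, Ne.symm h1, Ne.symm h2, Ne.symm h3, Ne.symm h4, Ne.symm h5]

def pvOrBits (u : List String) : Nat := u.foldr (fun t acc => pvBits t ||| acc) 0
def pvApiCount (u : List String) : Nat := u.foldr (fun t acc => pvApi t + acc) 0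

theorem pv_scan_valid : ∀ (u : List String) (m a n : Nat), (∀ t ∈ u, t ∈ pvKeys) →
    pvScan u m a n = some (m ||| pvOrBits u, a + pvApiCount u, n + u.length) := by
  intro u
  induction u with
  | nil => intro m a n _; simp [pvScan, pvOrBits, pvApiCount]
  | cons t ts ih =>
    intro m a n h
    have ht := pv_tokInfo_of_mem (h t (by simp))
    simp only [pvScan, ht]
    rw [ih _ _ _ (fun x hx => h x (by simp [hx]))]
    simp only [pvOrBits, pvApiCount, List.foldr_cons, List.length_cons, Nat.or_assoc, Option.some.injEq,
      Prod.mk.injEq]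
    exact ⟨trivial, by omega, by omega⟩

theorem pv_scan_invalid : ∀ (u : List String) (m a n : Nat),
    (∃ t ∈ u, t ∉ pvKeys) → pvScan u m a n = none := by
  intro u
  induction u with
  | nil => intro _ _ _ h; simp at h
  | cons t ts ih =>
    intro m a n h
    by_cases ht : t ∈ pvKeys
    · simp only [pvScan, pv_tokInfo_of_mem ht]
      apply ih
      rcases h with ⟨x, hx, hnx⟩
      rcases List.mem_cons.1 hx with h | h
      · exact absurd (h ▸ ht) hnx
      · exact ⟨x, h, hnx⟩
    · simp [pvScan, pv_tokInfo_of_not_mem ht]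

-- two Nodup lists with the same members (Set.equal) are permutations of each other
theorem pv_perm_of_equal {u v : List String} (hu : u.Nodup) (hv : v.Nodup)
    (h : PySem.Set.equal u v = true) : u.Perm v :=
  (List.perm_ext_iff_of_nodup hu hv).2 ((PySem.Set.equal_iff u v).1 h)

theorem pv_perm_pair {α : Type} {u : List α} {a b : α} (h : u.Perm [a, b]) :
    u = [a, b] ∨ u = [b, a] := by
  have hl : u.length = 2 := by simpa using h.length_eq
  cases u with
  | nil => simp at hl
  | cons x t =>
    cases t with
    | nil => simp at hl
    | cons y t2 =>
      cases t2 with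
      | cons z t3 => simp at hl
      | nil =>
        have hx : x ∈ ([a, b] : List α) := h.mem_iff.1 (by simp)
        simp only [List.mem_cons, List.not_mem_nil, or_false] at hx
        rcases hx with hx | hx
        · subst hx
          left
          have : [y].Perm [b] := (List.perm_cons x).1 h
          rw [List.perm_singleton.1 this]
        · subst hx
          right
          have h2 : [x, y].Perm [x, a] := h.trans (List.Perm.swap x a [])
          have : [y].Perm [a] := (List.perm_cons x).1 h2
          rw [List.perm_singleton.1 this]

theorem pv_dedup_ne_nil {xs : List String} (h : xs ≠ []) : PySem.List.dedup xs ≠ [] := by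
  intro hnil
  cases hq : xs with
  | nil => exact h hq
  | cons x t =>
    have hm : x ∈ PySem.List.dedup xs := (PySem.List.mem_dedup _ _).2 (by rw [hq]; simp)
    rw [hnil] at hm
    simp at hm

-- a nonempty Nodup list over a two-element universe is one of four lists
theorem pv_sub_pair {u : List String} (hn : u.Nodup) (hne : u ≠ [])
    (h : ∀ t ∈ u, t = "read" ∨ t = "write") :
    u = ["read"] ∨ u = ["write"] ∨ u = ["read", "write"] ∨ u = ["write", "read"] := by
  cases u with
  | nil => exact absurd rfl hne
  | cons x t =>
    cases t with
    | nil =>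
      rcases h x (by simp) with h1 | h1 <;> subst h1 <;> simp
    | cons y t2 =>
      have hx := h x (by simp)
      have hy := h y (by simp)
      have hxy : x ≠ y := by
        simp only [List.nodup_cons, List.mem_cons] at hn
        exact fun he => hn.1 (Or.inl he)
      have ht2 : t2 = [] := by
        cases hz : t2 with
        | nil => rfl
        | cons z t3 =>
          have hzm := h z (by simp [hz])
          simp only [List.nodup_cons, List.mem_cons, hz] at hn
          have hzx : z ≠ x := fun he => hn.1 (Or.inr (by simp [he.symm]))
          have hzy : z ≠ y := fun he => hn.2.1 (Or.inl he.symm)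
          rcases hx with h1 | h1 <;> rcases hy with h2 | h2 <;>
            rcases hzm with h3 | h3 <;> subst h1 <;> subst h3 <;> simp_all
      subst ht2
      rcases hx with h1 | h1 <;> rcases hy with h2 | h2 <;> subst h1 <;> subst h2 <;> simp_all

theorem pv_api_zero : ∀ (u : List String), pvApiCount u = 0 → ∀ t ∈ u, pvApi t = 0 := by
  intro u
  induction u with
  | nil => simp
  | cons x ts ih =>
    intro h t ht
    have hx : pvApi x + pvApiCount ts = 0 := h
    rcases List.mem_cons.1 ht with h1 | h1
    · subst h1; omega
    · exact ih (by omega) t h1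

theorem pv_main : ∀ (scopes : String) (resources : List String),
    phase2_target_py scopes resources = phase2_target_py_alt scopes resources := by
  intro scopes resources
  simp only [phase2_target_py, phase2_target_py_alt]
  by_cases hp : pvNormalizeList scopes = []
  · simp [hp, pvScan]
  · have hd := pv_dedup_ne_nil hp
    rw [if_neg hp]
    have hn : (PySem.List.dedup (pvNormalizeList scopes)).Nodup := PySem.List.nodup_dedup _
    generalize hu : PySem.List.dedup (pvNormalizeList scopes) = u at hn hd ⊢
    have hR : (":" ++ "read" : String) = ":read" := rfl
    have hW : (":" ++ "write" : String) = ":write" := rfl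
    have hS : (":" ++ "*" : String) = ":*" := rfl
    by_cases hv : ∀ t ∈ u, t ∈ pvKeys
    · rw [pv_scan_valid u 0 0 0 hv]
      simp only [Nat.zero_or, Nat.zero_add]
      have hlen : u.length ≠ 0 := fun h => hd (List.length_eq_zero_iff.1 h)
      rw [if_neg hlen]
      by_cases ha : pvApiCount u = 0 ∨ (pvApiCount u = u.length ∧ u.length = 1)
      · rw [if_pos ha]
        rcases ha with ha | ⟨ha1, ha2⟩
        · -- every token is plain: read or write
          have hrw : ∀ t ∈ u, t = "read" ∨ t = "write" := by
            intro t ht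
            have hz := pv_api_zero u ha t ht
            have hk := hv t ht
            simp only [pvKeys, List.mem_cons, List.not_mem_nil, or_false] at hk
            rcases hk with h1 | h1 | h1 | h1 | h1 <;> subst h1 <;> simp_all [pvApi]
          rcases pv_sub_pair hn hd hrw with h | h | h | h <;> subst h
          · rw [if_pos (Or.inl rfl),
              show PySem.List.pyGetD ["read", "write", "*"] ((pvOrBits ["read"] : Int) - 1) "" = "read" from by decide]
            simp only [String.append_assoc, hR]
          · rw [if_neg (by simp), if_pos (Or.inl rfl),
              show PySem.List.pyGetD ["read", "write", "*"] ((pvOrBits ["write"] : Int) - 1) "" = "write" from by decide]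
            simp only [String.append_assoc, hW]
          · rw [if_neg (by simp), if_neg (by simp), if_pos (Or.inl (by decide)),
              show PySem.List.pyGetD ["read", "write", "*"] ((pvOrBits ["read", "write"] : Int) - 1) "" = "*" from by decide]
            simp only [String.append_assoc, hS]
          · rw [if_neg (by simp), if_neg (by simp), if_pos (Or.inl (by decide)),
              show PySem.List.pyGetD ["read", "write", "*"] ((pvOrBits ["write", "read"] : Int) - 1) "" = "*" from by decide]
            simp only [String.append_assoc, hS]
        · -- a single api-style token
          obtain ⟨t, ht⟩ := List.length_eq_one_iff.1 ha2
          subst ht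
          have h1 : pvApi t = 1 := by
            have h := ha1
            simp only [pvApiCount, List.foldr_cons, List.foldr_nil, List.length_cons,
              List.length_nil] at h
            omega
          have hk := hv t (by simp)
          simp only [pvKeys, List.mem_cons, List.not_mem_nil, or_false] at hk
          rcases hk with h2 | h2 | h2 | h2 | h2 <;> subst h2
          · simp [pvApi] at h1
          · simp [pvApi] at h1
          · rw [if_pos (Or.inr rfl),
              show PySem.List.pyGetD ["read", "write", "*"] ((pvOrBits ["api:read"] : Int) - 1) "" = "read" from by decide]
            simp only [String.append_assoc, hR]
          · rw [if_neg (by simp), if_pos (Or.inr rfl),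
              show PySem.List.pyGetD ["read", "write", "*"] ((pvOrBits ["api:write"] : Int) - 1) "" = "write" from by decide]
            simp only [String.append_assoc, hW]
          · rw [if_neg (by simp), if_neg (by simp), if_pos (Or.inr rfl),
              show PySem.List.pyGetD ["read", "write", "*"] ((pvOrBits ["api:*"] : Int) - 1) "" = "*" from by decide]
            simp only [String.append_assoc, hS]
      · rw [if_neg ha]
        -- B rejects: u is none of the accepted combinations, so every A branch is false too
        have h1 : u ≠ ["read"] := fun he => ha (Or.inl (by rw [he]; rfl))
        have h2 : u ≠ ["api:read"] := fun he => ha (Or.inr (by rw [he]; exact ⟨rfl, rfl⟩))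
        have h3 : u ≠ ["write"] := fun he => ha (Or.inl (by rw [he]; rfl))
        have h4 : u ≠ ["api:write"] := fun he => ha (Or.inr (by rw [he]; exact ⟨rfl, rfl⟩))
        have h6 : u ≠ ["api:*"] := fun he => ha (Or.inr (by rw [he]; exact ⟨rfl, rfl⟩))
        have h5 : ¬ (PySem.Set.equal (PySem.Set.ofList u) (PySem.Set.ofList ["read", "write"]) = true) := by
          intro hq
          rw [PySem.Set.ofList_eq_self_of_nodup u hn] at hq
          rcases pv_perm_pair (pv_perm_of_equal hn (by decide) hq) with he | he <;>
            exact ha (Or.inl (by rw [he]; rfl))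
        rw [if_neg (by simp [h1, h2]), if_neg (by simp [h3, h4]), if_neg (by simp [h5, h6])]
    · -- some token is unknown: B returns None early, and A matches no branch
      push Not at hv
      rw [pv_scan_invalid u 0 0 0 hv]
      have hval : ∀ (v : List String), (∀ t ∈ v, t ∈ pvKeys) → u ≠ v := by
        rintro v hvv rfl
        obtain ⟨t, ht, hnt⟩ := hv
        exact hnt (hvv t ht)
      rw [if_neg (by simp [hval ["read"] (by decide), hval ["api:read"] (by decide)]),
        if_neg (by simp [hval ["write"] (by decide), hval ["api:write"] (by decide)])]
      rw [if_neg]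
      simp only [not_or]
      refine ⟨?_, hval ["api:*"] (by decide)⟩
      intro hq
      rw [PySem.Set.ofList_eq_self_of_nodup u hn] at hq
      rcases pv_perm_pair (pv_perm_of_equal hn (by decide) hq) with he | he
      · exact hval ["read", "write"] (by decide) he
      · exact hval ["write", "read"] (by decide) he

-- ===== VERDICT (by name: the statement is the Claim_ definition above) =====
theorem phase2_target_py_spec : Claim_equal_phase2_target_py := by
  intro scopes resources _
  exact pv_main scopes resources
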